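-- pv_equiv track=rewrite | github.com/pegeler/eddington2 | python/eddington.py | get_cumulative_eddington_number
-- ===== SOURCE A (Python) =====
-- from collections import defaultdict
-- from collections.abc import Iterable
-- from collections.abc import Iterator
--
-- def get_cumulative_eddington_number(distances: Iterable[float]) -> Iterator[int]:
--     """
--     Compute the cumulative Eddington Number for cycling.
--
--     :param Iterable distances: An iterable of distances for each day.
--     :returns: The Eddington number, E, for each element in the data.
--     """
--     current = 0
--     n_above = 0
--     dist_table = defaultdict(int)
--
--     for dist in map(int, distances):
--         if dist > current:
--             n_above += 1
--             dist_table[dist] += 1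
--             if n_above > current:
--                 current += 1
--                 n_above -= dist_table.pop(current, 0)
--
--         yield current
-- ===== SOURCE B (Python) =====
-- def get_cumulative_eddington_number(distances):
--     """Cumulative Eddington number: after each day, sort the distances so far in
--     descending order and count how many leading positions i (1-based) satisfy s[i-1] >= i."""
--     seen = []
--     for dist in map(int, distances):
--         seen.append(dist)
--         s = sorted(seen, reverse=True)
--         e = 0
--         while e < len(s) and s[e] >= e + 1:
--             e += 1
--         yield e
-- ===== Notes on version B (the rewrite author's own statement) =====
-- stated objective: simpler
-- what changed: A's incremental state machine (current, count-above, value table) is replaced by recomputing the Eddington number from its definition after each element: sort the accumulated distances descending and count leading ranks i with s[i-1] >= i.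
import Mathlib
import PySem

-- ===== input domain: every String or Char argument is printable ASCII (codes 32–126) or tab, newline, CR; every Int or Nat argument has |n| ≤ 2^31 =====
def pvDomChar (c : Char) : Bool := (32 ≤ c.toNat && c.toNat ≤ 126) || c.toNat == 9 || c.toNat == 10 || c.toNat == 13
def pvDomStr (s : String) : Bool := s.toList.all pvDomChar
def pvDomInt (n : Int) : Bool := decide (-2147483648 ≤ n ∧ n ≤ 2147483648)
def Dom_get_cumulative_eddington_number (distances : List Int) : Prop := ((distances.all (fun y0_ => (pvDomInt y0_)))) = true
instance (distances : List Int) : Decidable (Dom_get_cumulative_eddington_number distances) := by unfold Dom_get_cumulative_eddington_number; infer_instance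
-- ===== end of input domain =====

-- B replaces A's incremental counter/table state machine by the definition itself: after each
-- element, sort the accumulated distances descending and count the leading ranks i with s[i-1] ≥ i
-- (objective: simpler; not faster).

-- ===== PORT A =====
-- one iteration of A's loop body on the state (current, n_above, dist_table)
def aStep : Int × Int × PySem.Dict Int Int → Int → Int × Int × PySem.Dict Int Int
  | (current, n_above, dist_table), dist =>
    if current < dist then
      let n1 := n_above + 1
      let t1 := dist_table.modify dist 0 (· + 1)        -- dist_table[dist] += 1 (defaultdict int)
      if current < n1 then
        -- current += 1; n_above -= dist_table.pop(current, 0)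
        (current + 1, n1 - t1.getD (current + 1) 0, t1.erase (current + 1))
      else (current, n1, t1)
    else (current, n_above, dist_table)

-- the generator: yields the state's `current` after each element
def aRun : List Int → Int × Int × PySem.Dict Int Int → List Int
  | [], _ => []
  | d :: ds, st =>
    let st' := aStep st d
    st'.1 :: aRun ds st'

def get_cumulative_eddington_number (distances : List Int) : List Int :=
  aRun distances (0, 0, PySem.Dict.empty)

-- ===== PORT B =====
-- the while loop: e starts at 0; while e < len(s) and s[e] >= e + 1: e += 1
-- (s[e] is the head of the not-yet-visited suffix)
def bLoop : List Int → Int → Int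
  | [], e => e
  | x :: rest, e => if e + 1 ≤ x then bLoop rest (e + 1) else e

def bRun : List Int → List Int → List Int
  | [], _ => []
  | d :: ds, seen =>
    let seen' := seen ++ [d]
    bLoop (PySem.List.sorted seen' (fun x => x) true) 0 :: bRun ds seen'

def get_cumulative_eddington_number_alt (distances : List Int) : List Int :=
  bRun distances []

-- ===== PRECONDITION & SPEC =====
def Spec_get_cumulative_eddington_number (distances : List Int) (out : List Int) : Prop := out = get_cumulative_eddington_number_alt distances
instance (distances : List Int) (out : List Int) : Decidable (Spec_get_cumulative_eddington_number distances out) := by unfold Spec_get_cumulative_eddington_number; infer_instance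

-- ===== CLAIM (what is proved, stated in full; the proofs are below) =====
def Claim_equal_get_cumulative_eddington_number : Prop := ∀ (distances : List Int), Dom_get_cumulative_eddington_number distances → Spec_get_cumulative_eddington_number distances (get_cumulative_eddington_number distances)

-- ===== LEMMAS AND PROOFS =====

-- number of elements of l that are ≥ t
def cGE (l : List Int) (t : Int) : Int := (l.countP (fun x => decide (t ≤ x)) : Int)

lemma cGE_nonneg (l : List Int) (t : Int) : 0 ≤ cGE l t := Int.natCast_nonneg _

lemma cGE_nil (t : Int) : cGE [] t = 0 := rfl

lemma cGE_cons (a : Int) (l : List Int) (t : Int) :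
    cGE (a :: l) t = cGE l t + (if t ≤ a then 1 else 0) := by
  simp only [cGE, List.countP_cons]
  by_cases h : t ≤ a <;> simp [h]

lemma cGE_append (l : List Int) (x t : Int) :
    cGE (l ++ [x]) t = cGE l t + (if t ≤ x then 1 else 0) := by
  simp only [cGE, List.countP_append, List.countP_cons, List.countP_nil]
  by_cases h : t ≤ x <;> simp [h]

lemma cGE_anti (l : List Int) {a b : Int} (h : a ≤ b) : cGE l b ≤ cGE l a := by
  unfold cGE
  exact_mod_cast List.countP_mono_left (fun x _ hx => by
    simp only [decide_eq_true_eq] at hx ⊢; omega)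

lemma cGE_perm {l l' : List Int} (h : l.Perm l') (t : Int) : cGE l t = cGE l' t := by
  simp [cGE, h.countP_eq]

lemma cGE_succ_count (l : List Int) (t : Int) :
    cGE l t = (l.count t : Int) + cGE l (t + 1) := by
  induction l with
  | nil => simp [cGE_nil]
  | cons a l ih =>
    rw [cGE_cons, cGE_cons, List.count_cons, ih]
    by_cases h : a = t
    · subst h; push_cast; simp; omega
    · have : (a == t) = false := by simp [h]
      rw [this]
      push_cast
      split_ifs <;> omega

-- e is THE Eddington number of l
def charE (l : List Int) (e : Int) : Prop := 0 ≤ e ∧ e ≤ cGE l e ∧ cGE l (e + 1) ≤ e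

lemma charE_unique {l : List Int} {e e' : Int} (h : charE l e) (h' : charE l e') : e = e' := by
  obtain ⟨he0, he1, he2⟩ := h
  obtain ⟨hf0, hf1, hf2⟩ := h'
  rcases lt_trichotomy e e' with hlt | heq | hgt
  · have := cGE_anti l (show e + 1 ≤ e' by omega)
    omega
  · exact heq
  · have := cGE_anti l (show e' + 1 ≤ e by omega)
    omega

lemma bLoop_spec : ∀ s : List Int, s.Pairwise (fun a b => b ≤ a) → ∀ k : Int,
    k ≤ bLoop s k ∧ bLoop s k - k ≤ cGE s (bLoop s k) ∧ cGE s (bLoop s k + 1) ≤ bLoop s k - k := by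
  intro s
  induction s with
  | nil => intro _ k; simp [bLoop, cGE_nil]
  | cons x rest ih =>
    intro hp k
    have hx : ∀ y ∈ rest, y ≤ x := fun y hy => (List.pairwise_cons.mp hp).1 y hy
    have hrest := (List.pairwise_cons.mp hp).2
    show k ≤ bLoop (x :: rest) k ∧ _ ∧ _
    by_cases hcond : k + 1 ≤ x
    · have hb : bLoop (x :: rest) k = bLoop rest (k + 1) := by simp [bLoop, hcond]
      obtain ⟨h1, h2, h3⟩ := ih hrest (k + 1)
      set e := bLoop rest (k + 1) with he
      have hxe : e ≤ x := by
        by_cases heq : e = k + 1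
        · omega
        · have hpos : 0 < cGE rest e := by omega
          have : 0 < rest.countP (fun y => decide (e ≤ y)) := by
            unfold cGE at hpos; exact_mod_cast hpos
          obtain ⟨y, hy, hey⟩ := List.countP_pos_iff.mp this
          simp only [decide_eq_true_eq] at hey
          exact le_trans hey (hx y hy)
      rw [hb, cGE_cons, cGE_cons]
      refine ⟨by omega, ?_, ?_⟩
      · rw [if_pos hxe]; omega
      · split_ifs <;> omega
    · have hb : bLoop (x :: rest) k = k := by simp [bLoop, hcond]
      rw [hb]
      refine ⟨le_refl k, by have := cGE_nonneg (x :: rest) k; omega, ?_⟩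
      have : cGE (x :: rest) (k + 1) = 0 := by
        unfold cGE
        rw [List.countP_eq_zero.mpr]
        · rfl
        · intro a ha
          simp only [decide_eq_true_eq]
          rcases List.mem_cons.mp ha with h | h
          · omega
          · have := hx a h; omega
      omega

lemma charE_eddB (seen : List Int) :
    charE seen (bLoop (PySem.List.sorted seen (fun x => x) true) 0) := by
  set s := PySem.List.sorted seen (fun x => x) true with hs
  have hperm : s.Perm seen := PySem.List.sorted_perm seen (fun x => x) true
  have hpw : s.Pairwise (fun a b => b ≤ a) := PySem.List.sorted_pairwise_rev seen (fun x => x)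
  obtain ⟨h1, h2, h3⟩ := bLoop_spec s hpw 0
  exact ⟨h1, by rw [← cGE_perm hperm]; omega, by rw [← cGE_perm hperm]; omega⟩

lemma find?_filter_ne (k k' : Int) (h : k' ≠ k) : ∀ l : List (Int × Int),
    List.find? (fun p => p.1 == k') (l.filter (fun p => !p.1 == k)) =
      List.find? (fun p => p.1 == k') l := by
  intro l
  induction l with
  | nil => rfl
  | cons p l ih =>
    rw [List.filter_cons]
    by_cases hp : p.1 = k
    · rw [if_neg (by simp [hp]), show List.find? (fun q => q.1 == k') (p :: l) = _ from
        List.find?_cons_of_neg (by simp [hp, Ne.symm h])] at *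
      exact ih
    · rw [if_pos (by simp [hp])]
      by_cases hp' : (p.1 == k') = true
      · simp only [List.find?_cons, hp']
      · have hb : (p.1 == k') = false := by simpa using hp'
        simp only [List.find?_cons, hb, ih]

lemma getD_erase_of_ne (d : PySem.Dict Int Int) (k k' : Int) (h : k' ≠ k) (v0 : Int) :
    (d.erase k).getD k' v0 = d.getD k' v0 := by
  obtain ⟨items⟩ := d
  simp only [PySem.Dict.erase, PySem.Dict.getD, PySem.Dict.get?]
  rw [find?_filter_ne k k' h items]

-- the loop invariant of A: current is the Eddington number of the distances seen so far,
-- n_above counts elements > current, and dist_table holds the multiplicity of each value > current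
def InvA (seen : List Int) (st : Int × Int × PySem.Dict Int Int) : Prop :=
  charE seen st.1 ∧ st.2.1 = cGE seen (st.1 + 1) ∧
    ∀ d : Int, st.1 < d → st.2.2.getD d 0 = (seen.count d : Int)

lemma InvA_init : InvA [] (0, 0, PySem.Dict.empty) := by
  refine ⟨⟨le_refl 0, by simp [cGE_nil], by simp [cGE_nil]⟩, by simp [cGE_nil], ?_⟩
  intro d _
  simp [PySem.Dict.getD_empty]

lemma aStep_inv {seen : List Int} {st : Int × Int × PySem.Dict Int Int} (x : Int)
    (h : InvA seen st) : InvA (seen ++ [x]) (aStep st x) := by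
  obtain ⟨c, n, t⟩ := st
  obtain ⟨⟨hc0, hc1, hc2⟩, hn, ht⟩ := h
  simp only at hc0 hc1 hc2 hn ht
  show InvA (seen ++ [x]) (aStep (c, n, t) x)
  rw [aStep]
  by_cases hx : c < x
  · rw [if_pos hx]
    by_cases hn1 : c < n + 1
    · rw [if_pos hn1]
      have hcount : (t.modify x 0 (· + 1)).getD (c + 1) 0 = ((seen ++ [x]).count (c + 1) : Int) := by
        rw [PySem.Dict.getD_modify]
        by_cases hxc : (c + 1 : Int) = x
        · rw [if_pos hxc, ht x hx, hxc]
          simp [List.count_append]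
        · rw [if_neg hxc, ht (c + 1) (by omega)]
          simp [List.count_append, Ne.symm hxc]
      have hkey : charE (seen ++ [x]) (c + 1) := by
        refine ⟨by omega, ?_, ?_⟩
        · rw [cGE_append, if_pos (by omega)]; omega
        · rw [cGE_append]
          have := cGE_anti seen (show c + 1 ≤ c + 1 + 1 by omega)
          split_ifs <;> omega
      refine ⟨hkey, ?_, ?_⟩
      · show n + 1 - (t.modify x 0 (· + 1)).getD (c + 1) 0 = cGE (seen ++ [x]) (c + 1 + 1)
        rw [hcount]
        have hsplit := cGE_succ_count (seen ++ [x]) (c + 1)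
        have : cGE (seen ++ [x]) (c + 1) = n + 1 := by
          rw [cGE_append, if_pos (by omega)]; omega
        omega
      · intro d hd
        show ((t.modify x 0 (· + 1)).erase (c + 1)).getD d 0 = _
        rw [getD_erase_of_ne _ _ _ (by omega), PySem.Dict.getD_modify]
        by_cases hdx : d = x
        · rw [if_pos hdx, hdx, ht x hx]
          simp [List.count_append]
        · rw [if_neg hdx, ht d (by omega)]
          simp [List.count_append, show x ≠ d from fun hh => hdx hh.symm]
    · rw [if_neg hn1]
      refine ⟨⟨hc0, ?_, ?_⟩, ?_, ?_⟩
      · show c ≤ cGE (seen ++ [x]) c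
        rw [cGE_append]; split_ifs <;> omega
      · show cGE (seen ++ [x]) (c + 1) ≤ c
        rw [cGE_append, if_pos (by omega)]; omega
      · show n + 1 = cGE (seen ++ [x]) (c + 1)
        rw [cGE_append, if_pos (by omega)]; omega
      · intro d hd
        show (t.modify x 0 (· + 1)).getD d 0 = _
        rw [PySem.Dict.getD_modify]
        by_cases hdx : d = x
        · rw [if_pos hdx, hdx, ht x hx]
          simp [List.count_append]
        · rw [if_neg hdx, ht d hd]
          simp [List.count_append, show x ≠ d from fun hh => hdx hh.symm]
  · rw [if_neg hx]
    refine ⟨⟨hc0, ?_, ?_⟩, ?_, ?_⟩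
    · show c ≤ cGE (seen ++ [x]) c
      rw [cGE_append]; split_ifs <;> omega
    · show cGE (seen ++ [x]) (c + 1) ≤ c
      rw [cGE_append, if_neg (by omega)]; omega
    · show n = cGE (seen ++ [x]) (c + 1)
      rw [cGE_append, if_neg (by omega)]; omega
    · intro d hd
      show t.getD d 0 = _
      rw [ht d hd]
      simp [List.count_append, show x ≠ d by omega]

lemma run_eq : ∀ (ds seen : List Int) (st : Int × Int × PySem.Dict Int Int),
    InvA seen st → aRun ds st = bRun ds seen := by
  intro ds
  induction ds with
  | nil => intro _ _ _; rfl
  | cons d ds ih =>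
    intro seen st hinv
    have hinv' := aStep_inv d hinv
    rw [aRun, bRun]
    have hhead : (aStep st d).1 = bLoop (PySem.List.sorted (seen ++ [d]) (fun x => x) true) 0 :=
      charE_unique hinv'.1 (charE_eddB (seen ++ [d]))
    rw [hhead, ih (seen ++ [d]) (aStep st d) hinv']

-- ===== VERDICT (by name: the statement is the Claim_ definition above) =====
theorem get_cumulative_eddington_number_spec : Claim_equal_get_cumulative_eddington_number := by
  intro distances _
  show get_cumulative_eddington_number distances = get_cumulative_eddington_number_alt distances
  exact run_eq distances [] (0, 0, PySem.Dict.empty) InvA_init
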